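-- pv_equiv track=rewrite | github.com/qiyitang71/Random-Arena-Games | experiments/fpraas-parity.py | find_lasso_highest_priority
-- ===== SOURCE A (Python) =====
-- def find_lasso_highest_priority(vertices, edges, parity=0):
--     """
--     Check whether there is a lasso path starting from v0 such that
--     the cycle part has highest priority with the given parity.
--     parity = 0 for even, 1 for odd.
--     Returns True if such a lasso exists.
--     """
--     stack = [("v0", [])]  # (current_vertex, path_so_far)
--
--     while stack:
--         current, path = stack.pop()
--
--         if current in path:
--             # Found a cycle: cycle = path from first occurrence to end
--             cycle_start = path.index(current)
--             cycle = path[cycle_start:] + [current]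
--
--             # Highest priority in the cycle
--             max_priority = max(vertices[v] for v in cycle)
--             if max_priority % 2 == parity:
--                 return True
--             continue
--
--         new_path = path + [current]
--         for neighbor in edges.get(current, []):
--             stack.append((neighbor, new_path))
--
--     return False
-- ===== SOURCE B (Python) =====
-- def find_lasso_highest_priority(vertices, edges, parity=0):
--     """Per-vertex reformulation: there is a lasso whose cycle has max
--     priority of the given parity iff some vertex v with matching parity
--     is reachable from v0 and lies on a cycle that stays inside the
--     subgraph of vertices with priority <= priority(v)."""
--     names = {"v0"} | set(vertices)
--     for k, vs in edges.items():
--         names.add(k)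
--         names.update(vs)
--     n = len(names)
--
--     def closure(start, allowed):
--         # reachable set of `start` (0+ steps) staying inside `allowed`
--         S = {start}
--         for _ in range(n):
--             S = S | {w for u in S for w in edges.get(u, ()) if w in allowed}
--         return S
--
--     reach = closure("v0", names)
--     for v in reach:
--         p = vertices.get(v)
--         if p is None or p % 2 != parity:
--             continue
--         sub = {u for u in names if u in vertices and vertices[u] <= p}
--         if any(w in sub and v in closure(w, sub) for w in edges.get(v, ())):
--             return True
--     return False
-- ===== Notes on version B (the rewrite author's own statement) =====
-- stated objective: alternative
-- what changed: A enumerates every simple path from v0 with an explicit stack and inspects the cycle closing each path; B instead decides the same property per vertex: for each parity-matching vertex v reachable from v0 it checks whether v lies on a cycle inside the subgraph of vertices with priority <= priority(v), using an iterated set-closure reachability computation.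
-- outside the precondition, e.g. on find_lasso_highest_priority({'v0': 0}, {'v0': ['x', 'v0'], 'x': ['x']}, 0): A returns True, B returns True
import Mathlib
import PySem

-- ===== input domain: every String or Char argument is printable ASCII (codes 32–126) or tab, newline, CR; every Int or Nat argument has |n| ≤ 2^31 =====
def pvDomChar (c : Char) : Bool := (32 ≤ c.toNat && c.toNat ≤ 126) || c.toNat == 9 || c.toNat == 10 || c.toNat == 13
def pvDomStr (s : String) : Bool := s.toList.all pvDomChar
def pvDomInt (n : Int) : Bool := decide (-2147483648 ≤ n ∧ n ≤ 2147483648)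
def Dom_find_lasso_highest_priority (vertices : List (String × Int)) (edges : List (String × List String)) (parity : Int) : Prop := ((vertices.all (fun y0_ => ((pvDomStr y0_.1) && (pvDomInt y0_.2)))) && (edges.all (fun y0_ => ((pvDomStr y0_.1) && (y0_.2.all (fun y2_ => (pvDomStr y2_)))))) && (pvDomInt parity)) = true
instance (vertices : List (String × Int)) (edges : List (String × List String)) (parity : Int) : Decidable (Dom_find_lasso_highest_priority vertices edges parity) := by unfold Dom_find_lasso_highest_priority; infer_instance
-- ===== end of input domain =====

-- B decides the same property by per-vertex reachability checks (is some parity-matching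
-- vertex v, reachable from v0, on a cycle inside the subgraph of priority ≤ priority(v)?)
-- instead of A's stack enumeration of all simple paths; values agree on all of Pre_.

-- ===== PORT A =====

-- `edges.get(current, [])` (edges is a Python dict)
def pvNbrs (edges : List (String × List String)) (c : String) : List String :=
  ((PySem.Dict.ofList edges).get? c).getD []

-- `vertices[v]` lookup (vertices is a Python dict)
def pvPrio (vertices : List (String × Int)) (v : String) : Option Int :=
  (PySem.Dict.ofList vertices).get? v

-- the body of A's `if current in path:` branch, transliterated
def pvCheck (vertices : List (String × Int)) (parity : Int) (current : String) (path : List String) : Bool :=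
  let cycle_start := (PySem.List.index? path current).getD 0  -- `path.index(current)`; current ∈ path so it is `some`
  let cycle := PySem.List.slice path (some (cycle_start : Int)) none ++ [current]  -- `path[cycle_start:] + [current]`
  -- `max(vertices[v] for v in cycle)`: cycle is nonempty, and under Pre_ every cycle
  -- vertex has a priority, so both `getD 0` defaults are unreachable there
  let max_priority := (PySem.List.max? (cycle.map (fun v => (pvPrio vertices v).getD 0)) (fun x => x)).getD 0
  PySem.Int.mod max_priority 2 == parity

-- all vertex names A's loop can ever see ("v0" plus everything in edges)
def pvFuelU (edges : List (String × List String)) : List String :=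
  "v0" :: (PySem.Dict.ofList edges).items.flatMap (fun kv => kv.1 :: kv.2)

-- totality guard only: an upper bound on the number of iterations of A's while-loop
-- (proved sufficient in the lemmas below; it does not change the computed value)
def pvFuel (edges : List (String × List String)) : Nat :=
  ((pvFuelU edges).length + 1) ^ ((PySem.List.dedup (pvFuelU edges)).length + 1)

-- A's `while stack:` loop; head of the list is the top of Python's stack, so the
-- `for neighbor in …: stack.append(…)` pushes are the reversed neighbour list
def pvLoop (vertices : List (String × Int)) (edges : List (String × List String)) (parity : Int) :
    Nat → List (String × List String) → Bool
  | 0, _ => false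
  | _ + 1, [] => false
  | fuel + 1, (current, path) :: stack =>
    if current ∈ path then
      if pvCheck vertices parity current path then true
      else pvLoop vertices edges parity fuel stack
    else
      pvLoop vertices edges parity fuel
        (((pvNbrs edges current).map (fun n => (n, path ++ [current]))).reverse ++ stack)

def find_lasso_highest_priority (vertices : List (String × Int)) (edges : List (String × List String)) (parity : Int) : Bool :=
  pvLoop vertices edges parity (pvFuel edges) [("v0", [])]

-- ===== PORT B =====

-- one round of B's closure loop: `S = S | {w for u in S for w in edges.get(u, ()) if w in allowed}`
def pvStep (edges : List (String × List String)) (allowed : List String) (S : PySem.Set String) : PySem.Set String :=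
  PySem.Set.union S
    (PySem.Set.ofList (S.flatMap (fun u => (((PySem.Dict.ofList edges).get? u).getD []).filter (fun w => allowed.contains w))))

-- B's `closure(start, allowed)`: `S = {start}` then `for _ in range(n): S = step S`
def pvClosure (edges : List (String × List String)) (allowed : List String) (start : String) : Nat → PySem.Set String
  | 0 => PySem.Set.ofList [start]
  | k + 1 => pvStep edges allowed (pvClosure edges allowed start k)

def find_lasso_highest_priority_alt (vertices : List (String × Int)) (edges : List (String × List String)) (parity : Int) : Bool :=
  let vd := PySem.Dict.ofList vertices
  let ed := PySem.Dict.ofList edges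
  -- names = {"v0"} | set(vertices); then for k, vs in edges.items(): names.add(k); names.update(vs)
  let names : PySem.Set String :=
    ed.items.foldl (fun nm kv => PySem.Set.update (PySem.Set.add nm kv.1) kv.2)
      (PySem.Set.union (PySem.Set.ofList ["v0"]) vd.keys)
  let n := names.length
  let reach := pvClosure edges names "v0" n
  reach.any (fun v =>
    match vd.get? v with
    | none => false
    | some p =>
      if PySem.Int.mod p 2 == parity then
        let sub : PySem.Set String :=
          PySem.Set.ofList (names.filter (fun u => vd.contains u && decide ((vd.get? u).getD 0 ≤ p)))
        (ed.get? v |>.getD []).any (fun w => sub.contains w && (pvClosure edges sub w n).contains v)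
      else false)

-- ===== PRECONDITION & SPEC =====
-- Pre_-side reachability: a plain expanding reachable-set over the edge dict, defined
-- independently of both ports (A explores stack paths, B iterates pvStep); it only serves
-- to STATE the shape condition "every vertex on a cycle reachable from v0 has a priority".
def pvPreStep (edges : List (String × List String)) (S : List String) : List String :=
  PySem.List.dedup (S ++ S.flatMap (fun u => pvNbrs edges u))
def pvPreIter (edges : List (String × List String)) : Nat → List String → List String
  | 0, S => S
  | k + 1, S => pvPreIter edges k (pvPreStep edges S)
def pvPreReach (edges : List (String × List String)) (s : String) : List String :=
  pvPreIter edges (pvFuelU edges).length [s]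


-- Pre_ excludes inputs where some vertex lying on a cycle reachable from "v0" has no
-- priority entry in `vertices`: on those inputs A raises KeyError or returns a value
-- depending only on its DFS stack order, so they are outside the claim.
def Pre_find_lasso_highest_priority (vertices : List (String × Int)) (edges : List (String × List String)) (parity : Int) : Prop :=
  ∀ v ∈ pvPreReach edges "v0",
    ((pvNbrs edges v).any (fun w => (pvPreReach edges w).contains v)) = true →
    (pvPrio vertices v).isSome = true
instance (vertices : List (String × Int)) (edges : List (String × List String)) (parity : Int) : Decidable (Pre_find_lasso_highest_priority vertices edges parity) := by unfold Pre_find_lasso_highest_priority; infer_instance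

def pvWitness_find_lasso_highest_priority : (List (String × Int)) × (List (String × List String)) × Int :=
  ([("v0", 0)], [("v0", ["v0"])], 0)

def Spec_find_lasso_highest_priority (vertices : List (String × Int)) (edges : List (String × List String)) (parity : Int) (out : Bool) : Prop := out = find_lasso_highest_priority_alt vertices edges parity
instance (vertices : List (String × Int)) (edges : List (String × List String)) (parity : Int) (out : Bool) : Decidable (Spec_find_lasso_highest_priority vertices edges parity out) := by unfold Spec_find_lasso_highest_priority; infer_instance

-- ===== CLAIM (what is proved, stated in full; the proofs are below) =====
def Claim_equal_find_lasso_highest_priority : Prop := ∀ (vertices : List (String × Int)) (edges : List (String × List String)) (parity : Int), Dom_find_lasso_highest_priority vertices edges parity → Pre_find_lasso_highest_priority vertices edges parity → Spec_find_lasso_highest_priority vertices edges parity (find_lasso_highest_priority vertices edges parity)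

-- ===== LEMMAS AND PROOFS =====

-- ---- proof-side views of the graph ----

-- the edge relation of the Python graph
def pvE (edges : List (String × List String)) (u w : String) : Prop := w ∈ pvNbrs edges u

def pvReach (edges : List (String × List String)) : String → String → Prop :=
  Relation.ReflTransGen (pvE edges)

def pvKeyed (vertices : List (String × Int)) (v : String) : Prop := (pvPrio vertices v).isSome = true

def pvVal (vertices : List (String × Int)) (v : String) : Int := (pvPrio vertices v).getD 0

-- membership in the priority-≤-p subgraph
def pvSubP (vertices : List (String × Int)) (p : Int) (u : String) : Prop :=
  pvKeyed vertices u ∧ pvVal vertices u ≤ p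

def pvESub (vertices : List (String × Int)) (edges : List (String × List String)) (p : Int) (u w : String) : Prop :=
  pvE edges u w ∧ pvSubP vertices p w

-- "v witnesses a good lasso": matching parity, reachable from v0, and on a cycle that
-- stays inside the priority-≤-val(v) subgraph
def pvGood (vertices : List (String × Int)) (edges : List (String × List String)) (parity : Int) (v : String) : Prop :=
  pvKeyed vertices v ∧ PySem.Int.mod (pvVal vertices v) 2 = parity ∧ pvReach edges "v0" v ∧
  ∃ w, pvE edges v w ∧ pvSubP vertices (pvVal vertices v) w ∧
    Relation.ReflTransGen (pvESub vertices edges (pvVal vertices v)) w v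

-- mathematical form of Pre_
def pvPreM (vertices : List (String × Int)) (edges : List (String × List String)) : Prop :=
  ∀ v, pvReach edges "v0" v → (∃ w, pvE edges v w ∧ pvReach edges w v) → pvKeyed vertices v

-- the restricted edge relation B's closures compute with
def pvRClo (edges : List (String × List String)) (allowed : List String) (u w : String) : Prop :=
  pvE edges u w ∧ w ∈ allowed

-- ---- generic list facts ----

theorem pv_length_le_of_nodup_subset {α : Type} [DecidableEq α] {l₁ l₂ : List α}
    (h₁ : l₁.Nodup) (h₂ : ∀ x ∈ l₁, x ∈ l₂) : l₁.length ≤ l₂.length := by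
  calc l₁.length = l₁.toFinset.card := (List.toFinset_card_of_nodup h₁).symm
    _ ≤ l₂.toFinset.card := Finset.card_le_card (fun x hx =>
          List.mem_toFinset.mpr (h₂ x (List.mem_toFinset.mp hx)))
    _ ≤ l₂.length := l₂.toFinset_card_le

theorem pv_dup_decomp {α : Type} [DecidableEq α] : ∀ {l : List α}, ¬ l.Nodup →
    ∃ (l1 : List α) (x : α) (l2 l3 : List α), l = l1 ++ x :: (l2 ++ x :: l3) := by
  intro l
  induction l with
  | nil => intro h; exact absurd List.nodup_nil h
  | cons a t ih =>
    intro h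
    by_cases ha : a ∈ t
    · obtain ⟨s1, s2, rfl⟩ := List.append_of_mem ha
      exact ⟨[], a, s1, s2, rfl⟩
    · have hnt : ¬ t.Nodup := fun hnd => h (List.nodup_cons.mpr ⟨ha, hnd⟩)
      obtain ⟨l1, x, l2, l3, rfl⟩ := ih hnt
      exact ⟨a :: l1, x, l2, l3, rfl⟩


theorem pv_getLast?_append_cons {α : Type} (m : List α) (x : α) (t : List α) :
    (m ++ x :: t).getLast? = (x :: t).getLast? := by
  induction m with
  | nil => rfl
  | cons a m ih =>
    rw [List.cons_append, List.getLast?_cons, ih, List.getLast?_cons]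
    cases t <;> simp

theorem pv_getLast_eq_of_getLast? {α : Type} {l : List α} {a : α} (hne : l ≠ [])
    (h : l.getLast? = some a) : l.getLast hne = a := by
  rw [List.getLast?_eq_some_getLast hne] at h
  exact Option.some.inj h

theorem pv_head_eq_of_head? {α : Type} {l : List α} {a : α} (hne : l ≠ [])
    (h : l.head? = some a) : l.head hne = a := by
  rw [List.head?_eq_some_head hne] at h
  exact Option.some.inj h

-- ---- generic chain facts ----

theorem pv_chain_cut {α : Type} {R : α → α → Prop} {l1 l2 l3 : List α} {x : α}
    (h : List.IsChain R (l1 ++ x :: (l2 ++ x :: l3))) : List.IsChain R (l1 ++ x :: l3) := by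
  have h1 := (List.isChain_split.mp h).1
  have h2 := (List.isChain_split.mp h).2
  have h2' : List.IsChain R ((x :: l2) ++ x :: l3) := by simpa using h2
  exact List.isChain_split.mpr ⟨h1, (List.isChain_split.mp h2').2⟩

theorem pv_chain_rtg_getLast {α : Type} {R : α → α → Prop} {l : List α}
    (h : List.IsChain R l) (hne : l ≠ []) {x : α} (hx : x ∈ l) :
    Relation.ReflTransGen R x (l.getLast hne) := by
  obtain ⟨l1, l2, rfl⟩ := List.append_of_mem hx
  have h2 : List.IsChain R (x :: l2) := (List.isChain_split.mp h).2
  have hget : (l1 ++ x :: l2).getLast hne = (x :: l2).getLast (List.cons_ne_nil _ _) := by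
    rw [List.getLast_append_of_ne_nil]
  rw [hget]
  exact List.relationReflTransGen_of_exists_isChain_cons l2 h2 rfl

theorem pv_chain_rtg_head {α : Type} {R : α → α → Prop} {a : α} {t : List α}
    (h : List.IsChain R (a :: t)) {x : α} (hx : x ∈ a :: t) :
    Relation.ReflTransGen R a x := by
  obtain ⟨l1, l2, heq⟩ := List.append_of_mem hx
  cases l1 with
  | nil =>
    simp only [List.nil_append, List.cons.injEq] at heq
    rw [heq.1]
  | cons b t1 =>
    simp only [List.cons_append, List.cons.injEq] at heq
    obtain ⟨rfl, rfl⟩ := heq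
    have h' : List.IsChain R (a :: (t1 ++ x :: l2)) := h
    have hpre : List.IsChain R (a :: (t1 ++ [x])) := (List.isChain_cons_split.mp h').1
    have hpre' : List.IsChain R (a :: (t1 ++ [x])) := hpre
    have : Relation.ReflTransGen R a ((a :: (t1 ++ [x])).getLast (List.cons_ne_nil _ _)) :=
      List.relationReflTransGen_of_exists_isChain_cons _ hpre' rfl
    simpa [List.getLast_append_of_ne_nil] using this

theorem pv_path_nodup_aux {α : Type} [DecidableEq α] {R : α → α → Prop} :
    ∀ (n : Nat) (l : List α), l.length ≤ n → List.IsChain R l →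
    ∃ l', List.IsChain R l' ∧ l'.head? = l.head? ∧ l'.getLast? = l.getLast? ∧ l'.Nodup ∧
      ∀ x ∈ l', x ∈ l := by
  intro n
  induction n with
  | zero =>
    intro l hlen h
    have hl0 : l = [] := List.eq_nil_of_length_eq_zero (by omega)
    exact ⟨l, h, rfl, rfl, by simp [hl0], fun x hx => hx⟩
  | succ n ih =>
    intro l hlen h
    by_cases hnd : l.Nodup
    · exact ⟨l, h, rfl, rfl, hnd, fun x hx => hx⟩
    · obtain ⟨l1, x, l2, l3, heq⟩ := pv_dup_decomp hnd
      subst heq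
      obtain ⟨l', h', hh, hg, hnd', hsub⟩ := ih (l1 ++ x :: l3)
        (by simp [List.length_append] at hlen ⊢; omega) (pv_chain_cut h)
      refine ⟨l', h', ?_, ?_, hnd', ?_⟩
      · rw [hh]; cases l1 <;> simp
      · rw [hg, pv_getLast?_append_cons]
        have h2 : (l1 ++ x :: (l2 ++ x :: l3) : List α) = (l1 ++ x :: l2) ++ x :: l3 := by simp
        rw [h2, pv_getLast?_append_cons]
      · intro y hy
        have := hsub y hy
        simp only [List.mem_append, List.mem_cons] at this ⊢
        tauto

theorem pv_path_nodup {α : Type} [DecidableEq α] {R : α → α → Prop} (l : List α)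
    (h : List.IsChain R l) :
    ∃ l', List.IsChain R l' ∧ l'.head? = l.head? ∧ l'.getLast? = l.getLast? ∧ l'.Nodup ∧
      ∀ x ∈ l', x ∈ l :=
  pv_path_nodup_aux l.length l le_rfl h

theorem pv_cyc_nodup_aux {α : Type} [DecidableEq α] {R : α → α → Prop} :
    ∀ (n : Nat) (a : α) (mid : List α), mid.length ≤ n → List.IsChain R (a :: (mid ++ [a])) →
    ∃ mid', List.IsChain R (a :: (mid' ++ [a])) ∧ (a :: mid').Nodup ∧ ∀ x ∈ mid', x ∈ mid := by
  intro n
  induction n with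
  | zero =>
    intro a mid hlen h
    have hm0 : mid = [] := List.eq_nil_of_length_eq_zero (by omega)
    subst hm0
    exact ⟨[], h, by simp, by simp⟩
  | succ n ih =>
    intro a mid hlen h
    by_cases hmem : a ∈ mid
    · obtain ⟨m1, m2, hmeq⟩ := List.append_of_mem hmem
      subst hmeq
      have h' : List.IsChain R (a :: (m2 ++ [a])) := by
        have hcut := pv_chain_cut (l1 := ([] : List α)) (x := a) (l2 := m1) (l3 := m2 ++ [a])
          (by simpa [List.append_assoc] using h)
        simpa using hcut
      obtain ⟨mid', h'', hnd, hsub⟩ := ih a m2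
        (by simp [List.length_append] at hlen ⊢; omega) h'
      refine ⟨mid', h'', hnd, fun x hx => ?_⟩
      have := hsub x hx
      simp only [List.mem_append, List.mem_cons]
      tauto
    · by_cases hnd : mid.Nodup
      · exact ⟨mid, h, List.nodup_cons.mpr ⟨hmem, hnd⟩, fun x hx => hx⟩
      · obtain ⟨m1, x, m2, m3, hmeq⟩ := pv_dup_decomp hnd
        subst hmeq
        have h' : List.IsChain R (a :: ((m1 ++ x :: m3) ++ [a])) := by
          have hcut := pv_chain_cut (l1 := a :: m1) (x := x) (l2 := m2) (l3 := m3 ++ [a])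
            (by simpa [List.append_assoc] using h)
          simpa [List.append_assoc] using hcut
        obtain ⟨mid', h'', hnd', hsub⟩ := ih a (m1 ++ x :: m3)
          (by simp [List.length_append] at hlen ⊢; omega) h'
        refine ⟨mid', h'', hnd', fun y hy => ?_⟩
        have := hsub y hy
        simp only [List.mem_append, List.mem_cons] at this ⊢
        tauto

theorem pv_cyc_nodup {α : Type} [DecidableEq α] {R : α → α → Prop} (a : α) (mid : List α)
    (h : List.IsChain R (a :: (mid ++ [a]))) :
    ∃ mid', List.IsChain R (a :: (mid' ++ [a])) ∧ (a :: mid').Nodup ∧ ∀ x ∈ mid', x ∈ mid :=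
  pv_cyc_nodup_aux mid.length a mid le_rfl h

theorem pv_rotate {α : Type} {R : α → α → Prop} {a e : α} {mid : List α}
    (h : List.IsChain R (a :: (mid ++ [a]))) (hnd : (a :: mid).Nodup) (he : e ∈ a :: mid) :
    ∃ k', List.IsChain R (e :: (k' ++ [e])) ∧ (e :: k').Nodup ∧
      (∀ x, x ∈ e :: k' ↔ x ∈ a :: mid) := by
  rcases List.mem_cons.mp he with rfl | hemem
  · exact ⟨mid, h, hnd, fun x => Iff.rfl⟩
  · obtain ⟨m1, m2, rfl⟩ := List.append_of_mem hemem
    have h' : List.IsChain R ((a :: m1) ++ e :: (m2 ++ [a])) := by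
      simpa [List.append_assoc] using h
    have hsplit := List.isChain_split.mp h'
    have h2' : List.IsChain R ((e :: m2) ++ [a]) := by simpa using hsplit.2
    obtain ⟨hc1, _, hrel⟩ := List.isChain_append.mp h2'
    have hglue : List.IsChain R ((e :: m2) ++ ((a :: m1) ++ [e])) := by
      apply List.IsChain.append hc1 hsplit.1
      intro x hx y hy
      simp only [List.cons_append, List.head?_cons, Option.mem_def, Option.some.injEq] at hy
      subst hy
      exact hrel x hx a (by simp)
    have hperm : (e :: (m2 ++ a :: m1)).Perm (a :: (m1 ++ e :: m2)) := by
      have := List.perm_append_comm (l₁ := e :: m2) (l₂ := a :: m1)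
      simpa using this
    refine ⟨m2 ++ a :: m1, by simpa [List.append_assoc] using hglue, ?_, ?_⟩
    · exact hperm.nodup_iff.mpr hnd
    · intro x; exact hperm.mem_iff

theorem pv_closed_chain_succ {α : Type} {R : α → α → Prop} {a : α} {l : List α}
    (h : List.IsChain R (a :: (l ++ [a]))) {x : α} (hx : x ∈ a :: l) :
    ∃ w, R x w ∧ Relation.ReflTransGen R w x := by
  obtain ⟨m1, m2, hdec⟩ := List.append_of_mem hx
  have hfull : List.IsChain R (m1 ++ x :: (m2 ++ [a])) := by
    have : a :: (l ++ [a]) = m1 ++ x :: (m2 ++ [a]) := by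
      rw [show a :: (l ++ [a]) = (a :: l) ++ [a] by simp, hdec]; simp
    rwa [this] at h
  have h2 : List.IsChain R (x :: (m2 ++ [a])) := (List.isChain_split.mp hfull).2
  refine ⟨(m2 ++ [a]).head (by simp), ?_, ?_⟩
  · exact h2.rel_head? (List.head?_eq_some_head _)
  · have hga : (x :: (m2 ++ [a])).getLast (List.cons_ne_nil _ _) = a := by
      apply pv_getLast_eq_of_getLast?
      have : (x :: (m2 ++ [a]) : List α) = (x :: m2) ++ a :: [] := by simp
      rw [this, pv_getLast?_append_cons]
      rfl
    have hw1 : Relation.ReflTransGen R ((m2 ++ [a]).head (by simp)) a := by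
      have hmem : (m2 ++ [a]).head (by simp) ∈ x :: (m2 ++ [a]) :=
        List.mem_cons_of_mem _ (List.head_mem _)
      have := pv_chain_rtg_getLast h2 (List.cons_ne_nil _ _) hmem
      rwa [hga] at this
    have hx2 : x ∈ a :: (l ++ [a]) := by
      rcases List.mem_cons.mp hx with rfl | hxl
      · simp
      · simp [hxl]
    have hw2 : Relation.ReflTransGen R a x := pv_chain_rtg_head h hx2
    exact hw1.trans hw2

theorem pv_first_split {α : Type} (P : List α) (Q : α → Prop) [DecidablePred Q]
    (h : ∃ x ∈ P, Q x) : ∃ P1 e P2, P = P1 ++ e :: P2 ∧ Q e ∧ ∀ x ∈ P1, ¬ Q x := by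
  induction P with
  | nil => simp at h
  | cons a t ih =>
    by_cases hQ : Q a
    · exact ⟨[], a, t, rfl, hQ, by simp⟩
    · have h' : ∃ x ∈ t, Q x := by
        rcases h with ⟨x, hx, hQx⟩
        rcases List.mem_cons.mp hx with rfl | hxt
        · exact absurd hQx hQ
        · exact ⟨x, hxt, hQx⟩
      obtain ⟨P1, e, P2, heq, hQe, hnone⟩ := ih h'
      refine ⟨a :: P1, e, P2, by rw [heq]; rfl, hQe, ?_⟩
      intro x hx
      rcases List.mem_cons.mp hx with rfl | hx'
      · exact hQ
      · exact hnone x hx'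

theorem pv_max?_eq {l : List Int} {m : Int} (hm : m ∈ l) (hub : ∀ x ∈ l, x ≤ m) :
    PySem.List.max? l (fun x => x) = some m := by
  cases hmx : PySem.List.max? l (fun x => x) with
  | none =>
    rw [PySem.List.max?_eq_none_iff] at hmx
    subst hmx
    simp at hm
  | some m' =>
    have h1 := PySem.List.max?_mem hmx
    have h2 := PySem.List.max?_isMax hmx m hm
    have : m' = m := le_antisymm (hub m' h1) h2
    rw [this]

-- ---- closure lemmas (B's reachability computation) ----

theorem pv_mem_step {edges : List (String × List String)} {allowed : List String}
    {S : PySem.Set String} {x : String} :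
    x ∈ pvStep edges allowed S ↔ x ∈ S ∨ ∃ u ∈ S, pvE edges u x ∧ x ∈ allowed := by
  unfold pvStep
  rw [PySem.Set.mem_union, PySem.Set.mem_ofList]
  simp [List.mem_flatMap, List.mem_filter, pvE, pvNbrs]

theorem pv_closure_start (edges : List (String × List String)) (allowed : List String)
    (start : String) : ∀ k, start ∈ pvClosure edges allowed start k := by
  intro k
  induction k with
  | zero => simp [pvClosure, PySem.Set.mem_ofList]
  | succ k ih => exact pv_mem_step.mpr (Or.inl ih)

theorem pv_closure_mono (edges : List (String × List String)) (allowed : List String)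
    (start : String) (k : Nat) {x : String} (hx : x ∈ pvClosure edges allowed start k) :
    x ∈ pvClosure edges allowed start (k + 1) :=
  pv_mem_step.mpr (Or.inl hx)

theorem pv_closure_sound (edges : List (String × List String)) (allowed : List String)
    (start : String) : ∀ k x, x ∈ pvClosure edges allowed start k →
      Relation.ReflTransGen (pvRClo edges allowed) start x := by
  intro k
  induction k with
  | zero =>
    intro x hx
    simp [pvClosure, PySem.Set.mem_ofList] at hx
    subst hx
    exact Relation.ReflTransGen.refl
  | succ k ih =>
    intro x hx
    rcases pv_mem_step.mp hx with h | ⟨u, hu, he, ha⟩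
    · exact ih x h
    · exact (ih u hu).tail ⟨he, ha⟩

theorem pv_closure_nodup (edges : List (String × List String)) (allowed : List String)
    (start : String) : ∀ k, (pvClosure edges allowed start k).Nodup := by
  intro k
  induction k with
  | zero => exact PySem.Set.nodup_ofList _
  | succ k ih => exact PySem.Set.nodup_union _ _ ih

theorem pv_closure_subset_big (edges : List (String × List String)) (allowed : List String)
    (start : String) (big : List String) (hallow : ∀ y ∈ allowed, y ∈ big)
    (hstart : start ∈ big) : ∀ k x, x ∈ pvClosure edges allowed start k → x ∈ big := by
  intro k
  induction k with
  | zero =>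
    intro x hx
    simp [pvClosure, PySem.Set.mem_ofList] at hx
    subst hx
    exact hstart
  | succ k ih =>
    intro x hx
    rcases pv_mem_step.mp hx with h | ⟨u, _, _, ha⟩
    · exact ih x h
    · exact hallow x ha

def pvClosed (edges : List (String × List String)) (allowed : List String)
    (S : List String) : Prop :=
  ∀ u ∈ S, ∀ w, pvE edges u w → w ∈ allowed → w ∈ S

theorem pv_step_eq_of_closed {edges : List (String × List String)} {allowed : List String}
    {S : PySem.Set String} (h : pvClosed edges allowed S) : pvStep edges allowed S = S := by
  have hsub : ∀ y ∈ (S.flatMap (fun u =>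
      (((PySem.Dict.ofList edges).get? u).getD []).filter (fun w => allowed.contains w))), y ∈ S := by
    intro y hy
    simp only [List.mem_flatMap, List.mem_filter] at hy
    obtain ⟨u, hu, hy1, hy2⟩ := hy
    exact h u hu y hy1 (by simpa using hy2)
  show PySem.Set.update S _ = S
  rw [PySem.Set.update_eq_append_filter]
  have hnil : List.filter (fun y => !S.contains y) (PySem.Set.ofList (S.flatMap (fun u =>
      (((PySem.Dict.ofList edges).get? u).getD []).filter (fun w => allowed.contains w)))) = [] := by
    rw [List.filter_eq_nil_iff]
    intro y hy
    have hyS : y ∈ S := hsub y ((PySem.Set.mem_ofList _ _).mp hy)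
    simp [hyS]
  rw [PySem.Set.ofList_ofList, hnil, List.append_nil]

theorem pv_closure_stable (edges : List (String × List String)) (allowed : List String)
    (start : String) (j : Nat)
    (h : pvStep edges allowed (pvClosure edges allowed start j) = pvClosure edges allowed start j) :
    ∀ m, pvClosure edges allowed start (j + m) = pvClosure edges allowed start j := by
  intro m
  induction m with
  | zero => rfl
  | succ m ih =>
    show pvStep edges allowed (pvClosure edges allowed start (j + m)) = _
    rw [ih, h]

theorem pv_growth {edges : List (String × List String)} {allowed : List String}
    {start : String} {k : Nat}
    (h : ¬ pvClosed edges allowed (pvClosure edges allowed start k)) :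
    (pvClosure edges allowed start k).length + 1 ≤ (pvClosure edges allowed start (k + 1)).length := by
  unfold pvClosed at h
  push_neg at h
  obtain ⟨u, hu, w, he, ha, hw⟩ := h
  have hwin : w ∈ pvClosure edges allowed start (k + 1) :=
    pv_mem_step.mpr (Or.inr ⟨u, hu, he, ha⟩)
  have hnd : (w :: pvClosure edges allowed start k).Nodup :=
    List.nodup_cons.mpr ⟨hw, pv_closure_nodup edges allowed start k⟩
  have := pv_length_le_of_nodup_subset hnd (fun x hx => by
    rcases List.mem_cons.mp hx with rfl | hx'
    · exact hwin
    · exact pv_closure_mono edges allowed start k hx')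
  simpa using this

theorem pv_exists_closed (edges : List (String × List String)) (allowed : List String)
    (start : String) (n : Nat) (big : List String) (hallow : ∀ y ∈ allowed, y ∈ big)
    (hstart : start ∈ big) (hn : big.length ≤ n) :
    ∃ j ≤ n, pvClosed edges allowed (pvClosure edges allowed start j) := by
  by_contra hc
  push_neg at hc
  have hgrow : ∀ k, k ≤ n → k + 1 ≤ (pvClosure edges allowed start k).length := by
    intro k
    induction k with
    | zero =>
      intro _
      have : pvClosure edges allowed start 0 = [start] := rfl
      simp [this]
    | succ k ih =>
      intro hk
      have h1 := ih (by omega)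
      have h2 := pv_growth (hc k (by omega))
      omega
  have hfin := hgrow n le_rfl
  have hbnd := pv_length_le_of_nodup_subset (pv_closure_nodup edges allowed start n)
    (fun x hx => pv_closure_subset_big edges allowed start big hallow hstart n x hx)
  omega

theorem pv_closure_complete (edges : List (String × List String)) (allowed : List String)
    (start : String) (n : Nat) (big : List String) (hb : big.Nodup)
    (hallow : ∀ y ∈ allowed, y ∈ big) (hstart : start ∈ big) (hn : big.length ≤ n)
    {x : String} (hrtg : Relation.ReflTransGen (pvRClo edges allowed) start x) :
    x ∈ pvClosure edges allowed start n := by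
  obtain ⟨j, hj, hcl⟩ := pv_exists_closed edges allowed start n big hallow hstart hn
  have hstab : pvClosure edges allowed start n = pvClosure edges allowed start j := by
    have := pv_closure_stable edges allowed start j (pv_step_eq_of_closed hcl) (n - j)
    rwa [Nat.add_sub_cancel' hj] at this
  rw [hstab]
  induction hrtg with
  | refl => exact pv_closure_start edges allowed start j
  | tail _ hbc ih => exact hcl _ ih _ hbc.1 hbc.2

theorem pv_closure_iff (edges : List (String × List String)) (allowed : List String)
    (start : String) (n : Nat) (big : List String) (hb : big.Nodup)
    (hallow : ∀ y ∈ allowed, y ∈ big) (hstart : start ∈ big) (hn : big.length ≤ n)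
    (x : String) :
    x ∈ pvClosure edges allowed start n ↔
      Relation.ReflTransGen (pvRClo edges allowed) start x :=
  ⟨pv_closure_sound edges allowed start n x,
   pv_closure_complete edges allowed start n big hb hallow hstart hn⟩


theorem pv_nbrs_mem_U {edges : List (String × List String)} {u w : String}
    (h : w ∈ pvNbrs edges u) : w ∈ pvFuelU edges := by
  unfold pvNbrs at h
  cases hg : (PySem.Dict.ofList edges).get? u with
  | none => rw [hg] at h; simp at h
  | some vs =>
    rw [hg] at h
    simp only [Option.getD_some] at h
    have hmem := PySem.Dict.mem_items_of_get?_eq_some _ hg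
    exact List.mem_cons_of_mem _ (List.mem_flatMap.mpr ⟨(u, vs), hmem, by simp [h]⟩)

theorem pv_nbrs_len_le (edges : List (String × List String)) (u : String) :
    (pvNbrs edges u).length ≤ (pvFuelU edges).length := by
  unfold pvNbrs
  cases hg : (PySem.Dict.ofList edges).get? u with
  | none => simp
  | some vs =>
    simp only [Option.getD_some]
    have hmem := PySem.Dict.mem_items_of_get?_eq_some _ hg
    obtain ⟨i1, i2, hitems⟩ := List.append_of_mem hmem
    unfold pvFuelU
    rw [hitems]
    simp [List.flatMap_append]
    omega


-- ---- Pre_'s reachable set computes pvReach ----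

theorem pv_mem_prestep {edges : List (String × List String)} {S : List String} {x : String} :
    x ∈ pvPreStep edges S ↔ x ∈ S ∨ ∃ u ∈ S, pvE edges u x := by
  unfold pvPreStep
  rw [PySem.List.mem_dedup]
  simp [List.mem_flatMap, pvE]

theorem pv_preIter_comm (edges : List (String × List String)) :
    ∀ (k : Nat) (S : List String),
      pvPreIter edges k (pvPreStep edges S) = pvPreStep edges (pvPreIter edges k S) := by
  intro k
  induction k with
  | zero => intro S; rfl
  | succ k ih =>
    intro S
    show pvPreIter edges k (pvPreStep edges (pvPreStep edges S)) = _
    rw [ih]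
    rfl

theorem pv_preIter_succ_out (edges : List (String × List String)) (k : Nat) (S : List String) :
    pvPreIter edges (k + 1) S = pvPreStep edges (pvPreIter edges k S) :=
  pv_preIter_comm edges k S

theorem pv_preIter_start (edges : List (String × List String)) (s : String) :
    ∀ k, s ∈ pvPreIter edges k [s] := by
  intro k
  induction k with
  | zero => simp [pvPreIter]
  | succ k ih =>
    rw [pv_preIter_succ_out]
    exact pv_mem_prestep.mpr (Or.inl ih)

theorem pv_preIter_mono (edges : List (String × List String)) (s : String) (k : Nat)
    {x : String} (hx : x ∈ pvPreIter edges k [s]) : x ∈ pvPreIter edges (k + 1) [s] := by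
  rw [pv_preIter_succ_out]
  exact pv_mem_prestep.mpr (Or.inl hx)

theorem pv_preIter_sound (edges : List (String × List String)) (s : String) :
    ∀ k x, x ∈ pvPreIter edges k [s] → pvReach edges s x := by
  intro k
  induction k with
  | zero =>
    intro x hx
    simp [pvPreIter] at hx
    subst hx
    exact Relation.ReflTransGen.refl
  | succ k ih =>
    intro x hx
    rw [pv_preIter_succ_out] at hx
    rcases pv_mem_prestep.mp hx with h | ⟨u, hu, he⟩
    · exact ih x h
    · exact (ih u hu).tail he

theorem pv_preIter_nodup (edges : List (String × List String)) (s : String) :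
    ∀ k, 1 ≤ k → (pvPreIter edges k [s]).Nodup := by
  intro k hk
  cases k with
  | zero => omega
  | succ k =>
    rw [pv_preIter_succ_out]
    exact PySem.List.nodup_dedup _

theorem pv_preIter_subset_big (edges : List (String × List String)) (s : String)
    (hs : s ∈ pvFuelU edges) :
    ∀ k x, x ∈ pvPreIter edges k [s] → x ∈ PySem.List.dedup (pvFuelU edges) := by
  intro k
  induction k with
  | zero =>
    intro x hx
    simp [pvPreIter] at hx
    subst hx
    exact (PySem.List.mem_dedup _ _).mpr hs
  | succ k ih =>
    intro x hx
    rw [pv_preIter_succ_out] at hx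
    rcases pv_mem_prestep.mp hx with h | ⟨u, _, he⟩
    · exact ih x h
    · exact (PySem.List.mem_dedup _ _).mpr (pv_nbrs_mem_U he)

def pvPreClosed (edges : List (String × List String)) (S : List String) : Prop :=
  ∀ u ∈ S, ∀ w, pvE edges u w → w ∈ S

theorem pv_prestep_eq_of_closed {edges : List (String × List String)} {S : List String}
    (hnd : S.Nodup) (h : pvPreClosed edges S) : pvPreStep edges S = S := by
  unfold pvPreStep
  have h1 : PySem.Set.ofList S = S := by
    first
      | exact PySem.Set.ofList_eq_self_of_nodup hnd
      | exact PySem.Set.ofList_eq_self_of_nodup S hnd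
      | exact PySem.Set.ofList_eq_self_of_nodup _ hnd
  rw [PySem.List.dedup_eq_ofList, PySem.Set.ofList_append, h1,
    PySem.Set.update_eq_append_filter]
  have hnil : List.filter (fun y => !PySem.Set.contains S y)
      (PySem.Set.ofList (S.flatMap (fun u => pvNbrs edges u))) = [] := by
    rw [List.filter_eq_nil_iff]
    intro y hy
    rw [PySem.Set.mem_ofList] at hy
    simp only [List.mem_flatMap] at hy
    obtain ⟨u, hu, hy'⟩ := hy
    have hyS : y ∈ S := h u hu y hy'
    simp [hyS]
  rw [hnil, List.append_nil]

theorem pv_preIter_stable (edges : List (String × List String)) (s : String) (j : Nat)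
    (h : pvPreStep edges (pvPreIter edges j [s]) = pvPreIter edges j [s]) :
    ∀ m, pvPreIter edges (j + m) [s] = pvPreIter edges j [s] := by
  intro m
  induction m with
  | zero => rfl
  | succ m ih =>
    have : j + (m + 1) = (j + m) + 1 := by omega
    rw [this, pv_preIter_succ_out, ih, h]

theorem pv_pregrowth {edges : List (String × List String)} {s : String} {k : Nat}
    (hk : 1 ≤ k) (h : ¬ pvPreClosed edges (pvPreIter edges k [s])) :
    (pvPreIter edges k [s]).length + 1 ≤ (pvPreIter edges (k + 1) [s]).length := by
  unfold pvPreClosed at h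
  push_neg at h
  obtain ⟨u, hu, w, he, hw⟩ := h
  have hwin : w ∈ pvPreIter edges (k + 1) [s] := by
    rw [pv_preIter_succ_out]
    exact pv_mem_prestep.mpr (Or.inr ⟨u, hu, he⟩)
  have hnd : (w :: pvPreIter edges k [s]).Nodup :=
    List.nodup_cons.mpr ⟨hw, pv_preIter_nodup edges s k hk⟩
  have := pv_length_le_of_nodup_subset hnd (fun x hx => by
    rcases List.mem_cons.mp hx with rfl | hx'
    · exact hwin
    · exact pv_preIter_mono edges s k hx')
  simpa using this

theorem pv_preReach_complete (edges : List (String × List String)) (s : String)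
    (hs : s ∈ pvFuelU edges) {x : String} (hrtg : pvReach edges s x) :
    x ∈ pvPreReach edges s := by
  have hUpos : 1 ≤ (pvFuelU edges).length := by simp [pvFuelU]
  have hbig : (PySem.List.dedup (pvFuelU edges)).length ≤ (pvFuelU edges).length := by
    rw [PySem.List.dedup_eq_ofList]; exact PySem.Set.length_ofList_le _
  have hexists : ∃ j, 1 ≤ j ∧ j ≤ (pvFuelU edges).length ∧
      pvPreClosed edges (pvPreIter edges j [s]) := by
    by_contra hc
    push_neg at hc
    have hgrow : ∀ k, 1 ≤ k → k ≤ (pvFuelU edges).length + 1 →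
        k ≤ (pvPreIter edges k [s]).length := by
      intro k
      induction k with
      | zero => intro h; omega
      | succ k ih =>
        intro _ hk
        by_cases hk1 : 1 ≤ k
        · have ihk := ih hk1 (by omega)
          have hgrowth := pv_pregrowth hk1 (hc k hk1 (by omega))
          omega
        · have hk0 : k = 0 := by omega
          subst hk0
          have hstart := pv_preIter_start edges s (0 + 1)
          cases hq : pvPreIter edges (0 + 1) [s] with
          | nil => rw [hq] at hstart; simp at hstart
          | cons a t => simp
    have hfin := hgrow ((pvFuelU edges).length + 1) (by omega) le_rfl
    have hbnd := pv_length_le_of_nodup_subset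
      (pv_preIter_nodup edges s ((pvFuelU edges).length + 1) (by omega))
      (fun x hx => pv_preIter_subset_big edges s hs _ x hx)
    omega
  obtain ⟨j, hj1, hjn, hcl⟩ := hexists
  have hstab := pv_preIter_stable edges s j
    (pv_prestep_eq_of_closed (pv_preIter_nodup edges s j hj1) hcl) ((pvFuelU edges).length - j)
  have hn : j + ((pvFuelU edges).length - j) = (pvFuelU edges).length := by omega
  rw [hn] at hstab
  unfold pvPreReach
  rw [hstab]
  induction hrtg with
  | refl => exact pv_preIter_start edges s j
  | tail _ hbc ih => exact hcl _ ih _ hbc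

theorem pv_preReach_iff (edges : List (String × List String)) (s : String)
    (hs : s ∈ pvFuelU edges) (x : String) :
    x ∈ pvPreReach edges s ↔ pvReach edges s x :=
  ⟨pv_preIter_sound edges s _ x, pv_preReach_complete edges s hs⟩


-- ---- the DFS predicate (what A's stack loop searches for) ----

inductive pvFound (vertices : List (String × Int)) (edges : List (String × List String)) (parity : Int) : String → List String → Prop
  | cyc {c : String} {p : List String} : c ∈ p → pvCheck vertices parity c p = true →
      pvFound vertices edges parity c p
  | step {c n : String} {p : List String} : c ∉ p → n ∈ pvNbrs edges c →
      pvFound vertices edges parity n (p ++ [c]) → pvFound vertices edges parity c p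

-- invariant of A's stack and the termination measure of the loop
def pvInv (edges : List (String × List String)) (st : List (String × List String)) : Prop :=
  ∀ cp ∈ st, cp.1 ∈ pvFuelU edges ∧ cp.2.Nodup ∧ ∀ x ∈ cp.2, x ∈ pvFuelU edges

def pvM (edges : List (String × List String)) (st : List (String × List String)) : Nat :=
  (st.map (fun cp =>
    ((pvFuelU edges).length + 1) ^ ((PySem.List.dedup (pvFuelU edges)).length + 1 - cp.2.length))).sum

theorem pv_path_len_le {edges : List (String × List String)} {p : List String}
    (hnd : p.Nodup) (hsub : ∀ x ∈ p, x ∈ pvFuelU edges) :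
    p.length ≤ (PySem.List.dedup (pvFuelU edges)).length :=
  pv_length_le_of_nodup_subset hnd (fun x hx => (PySem.List.mem_dedup _ _).mpr (hsub x hx))

theorem pv_loop_iff (vertices : List (String × Int)) (edges : List (String × List String))
    (parity : Int) : ∀ (fuel : Nat) (st : List (String × List String)), pvInv edges st →
      pvM edges st ≤ fuel →
      (pvLoop vertices edges parity fuel st = true ↔
        ∃ cp ∈ st, pvFound vertices edges parity cp.1 cp.2) := by
  intro fuel
  induction fuel with
  | zero =>
    intro st hinv hM
    cases st with
    | nil => simp [pvLoop]
    | cons cp t =>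
      exfalso
      have hpos : 1 ≤ ((pvFuelU edges).length + 1) ^ ((PySem.List.dedup (pvFuelU edges)).length + 1 - cp.2.length) :=
        Nat.one_le_pow _ _ (by omega)
      simp only [pvM, List.map_cons, List.sum_cons, Nat.le_zero] at hM
      omega
  | succ fuel ih =>
    intro st hinv hM
    cases st with
    | nil => simp [pvLoop]
    | cons cp t =>
      obtain ⟨current, path⟩ := cp
      have hinv0 := hinv (current, path) (List.mem_cons_self)
      have hMt : pvM edges t ≤ fuel := by
        have hpos : 1 ≤ ((pvFuelU edges).length + 1) ^ ((PySem.List.dedup (pvFuelU edges)).length + 1 - path.length) :=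
          Nat.one_le_pow _ _ (by omega)
        simp only [pvM, List.map_cons, List.sum_cons] at hM ⊢
        omega
      by_cases hin : current ∈ path
      · by_cases hchk : pvCheck vertices parity current path = true
        · simp only [pvLoop, if_pos hin, if_pos hchk]
          exact iff_of_true (by trivial) ⟨(current, path), List.mem_cons_self, pvFound.cyc hin hchk⟩
        · have hrec := ih t (fun cp hcp => hinv cp (List.mem_cons_of_mem _ hcp)) hMt
          have hnf : ¬ pvFound vertices edges parity current path := by
            intro hf
            cases hf with
            | cyc _ hc => exact hchk hc
            | step hni _ _ => exact hni hin
          simp only [pvLoop, if_pos hin, if_neg hchk]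
          rw [hrec]
          constructor
          · rintro ⟨cp, hcp, hf⟩
            exact ⟨cp, List.mem_cons_of_mem _ hcp, hf⟩
          · rintro ⟨cp, hcp, hf⟩
            rcases List.mem_cons.mp hcp with rfl | hcp'
            · exact absurd hf hnf
            · exact ⟨cp, hcp', hf⟩
      · -- push case
        have hnewInv : pvInv edges
            (((pvNbrs edges current).map (fun n => (n, path ++ [current]))).reverse ++ t) := by
          intro cp hcp
          rcases List.mem_append.mp hcp with hcp' | hcp'
          · rw [List.mem_reverse, List.mem_map] at hcp'
            obtain ⟨nb, hnb, rfl⟩ := hcp'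
            refine ⟨pv_nbrs_mem_U hnb, ?_, ?_⟩
            · rw [List.nodup_append]
              refine ⟨hinv0.2.1, by simp, ?_⟩
              intro a ha b hb
              rw [List.mem_singleton] at hb
              subst hb
              exact fun hac => hin (hac ▸ ha)
            · intro x hx
              rcases List.mem_append.mp hx with hx' | hx'
              · exact hinv0.2.2 x hx'
              · simp at hx'
                subst hx'
                exact hinv0.1
          · exact hinv cp (List.mem_cons_of_mem _ hcp')
        have hnewM : pvM edges
            (((pvNbrs edges current).map (fun n => (n, path ++ [current]))).reverse ++ t) ≤ fuel := by
          have hlen : path.length ≤ (PySem.List.dedup (pvFuelU edges)).length :=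
            pv_path_len_le hinv0.2.1 hinv0.2.2
          set Bd := (pvFuelU edges).length with hBd
          set Nd := (PySem.List.dedup (pvFuelU edges)).length with hNd
          have hknum : (pvNbrs edges current).length ≤ Bd := pv_nbrs_len_le edges current
          have hsum : pvM edges (((pvNbrs edges current).map (fun n => (n, path ++ [current]))).reverse ++ t)
              = (pvNbrs edges current).length * (Bd + 1) ^ (Nd - path.length) + pvM edges t := by
            unfold pvM
            rw [List.map_append, List.sum_append, List.map_reverse, List.sum_reverse,
              List.map_map]
            congr 1
            have : ((pvNbrs edges current).map
                ((fun cp : String × List String => (Bd + 1) ^ (Nd + 1 - cp.2.length)) ∘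
                 (fun n => (n, path ++ [current])))) =
                (pvNbrs edges current).map (fun _ => (Bd + 1) ^ (Nd - path.length)) := by
              apply List.map_congr_left
              intro x _
              simp only [Function.comp]
              congr 1
              simp only [List.length_append, List.length_cons, List.length_nil]
              omega
            rw [this, List.map_const', List.sum_replicate, smul_eq_mul]
          have hMc : (Bd + 1) ^ (Nd + 1 - path.length) + pvM edges t ≤ fuel + 1 := by
            simpa [pvM] using hM
          have hsplit : (Bd + 1) ^ (Nd + 1 - path.length)
              = (Bd + 1) ^ (Nd - path.length) * (Bd + 1) := by
            rw [← pow_succ]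
            congr 1
            omega
          have hcpos : 1 ≤ (Bd + 1) ^ (Nd - path.length) := Nat.one_le_pow _ _ (by omega)
          have hmul : (pvNbrs edges current).length * (Bd + 1) ^ (Nd - path.length)
              ≤ Bd * (Bd + 1) ^ (Nd - path.length) :=
            Nat.mul_le_mul_right _ hknum
          rw [hsum]
          nlinarith [hMc, hsplit, hcpos, hmul]
        have hrec := ih _ hnewInv hnewM
        have hiff : pvFound vertices edges parity current path ↔
            ∃ nb ∈ pvNbrs edges current, pvFound vertices edges parity nb (path ++ [current]) := by
          constructor
          · intro hf
            cases hf with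
            | cyc hc _ => exact absurd hc hin
            | step _ hnb hf' => exact ⟨_, hnb, hf'⟩
          · rintro ⟨nb, hnb, hf⟩
            exact pvFound.step hin hnb hf
        simp only [pvLoop, if_neg hin]
        rw [hrec]
        constructor
        · rintro ⟨cp, hcp, hf⟩
          rcases List.mem_append.mp hcp with hcp' | hcp'
          · rw [List.mem_reverse, List.mem_map] at hcp'
            obtain ⟨nb, hnb, rfl⟩ := hcp'
            exact ⟨(current, path), List.mem_cons_self, hiff.mpr ⟨nb, hnb, hf⟩⟩
          · exact ⟨cp, List.mem_cons_of_mem _ hcp', hf⟩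
        · rintro ⟨cp, hcp, hf⟩
          rcases List.mem_cons.mp hcp with rfl | hcp'
          · obtain ⟨nb, hnb, hf'⟩ := hiff.mp hf
            exact ⟨(nb, path ++ [current]),
              List.mem_append.mpr (Or.inl (by rw [List.mem_reverse, List.mem_map]; exact ⟨nb, hnb, rfl⟩)),
              hf'⟩
          · exact ⟨cp, List.mem_append.mpr (Or.inr hcp'), hf⟩

theorem pv_A_iff_found (vertices : List (String × Int)) (edges : List (String × List String))
    (parity : Int) :
    (find_lasso_highest_priority vertices edges parity = true) ↔
      pvFound vertices edges parity "v0" [] := by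
  unfold find_lasso_highest_priority
  rw [pv_loop_iff vertices edges parity (pvFuel edges) [("v0", [])]]
  · constructor
    · rintro ⟨cp, hcp, hf⟩
      simp at hcp
      rwa [hcp] at hf
    · intro hf
      exact ⟨("v0", []), List.mem_singleton.mpr rfl, hf⟩
  · intro cp hcp
    simp at hcp
    rw [hcp]
    exact ⟨by simp [pvFuelU], by simp, by simp⟩
  · unfold pvM pvFuel
    simp

-- ---- soundness: if A's DFS finds a lasso, there is a good vertex ----

theorem pv_found_sound {vertices : List (String × Int)} {edges : List (String × List String)}
    {parity : Int} (hpre : pvPreM vertices edges) :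
    ∀ {c : String} {p : List String}, pvFound vertices edges parity c p → p.Nodup →
      List.IsChain (pvE edges) (p ++ [c]) → (p ++ [c]).head? = some "v0" →
      ∃ v, pvGood vertices edges parity v := by
  intro c p hf
  induction hf with
  | @cyc c p hin hchk =>
    intro hnd hch hhd
    obtain ⟨p1, p2, rfl⟩ := List.append_of_mem hin
    have hndparts : p1.Nodup ∧ (c :: p2).Nodup ∧ ∀ x ∈ p1, x ∉ c :: p2 := by
      rw [List.nodup_append] at hnd
      exact ⟨hnd.1, hnd.2.1, fun x hx hx' => hnd.2.2 x hx x hx' rfl⟩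
    have hcnp1 : c ∉ p1 := fun hc => hndparts.2.2 c hc (by simp)
    have hcnp2 : c ∉ p2 := (List.nodup_cons.mp hndparts.2.1).1
    -- what pvCheck computed
    have hidx : PySem.List.index? (p1 ++ c :: p2) c = some p1.length :=
      (PySem.List.index?_eq_some_iff _ _ _).mpr ⟨p1, p2, rfl, rfl, hcnp1⟩
    have hslice : PySem.List.slice (p1 ++ c :: p2) (some (p1.length : Int)) none = c :: p2 := by
      rw [PySem.List.slice_from_natCast, List.drop_left]
    have hchk' : PySem.Int.mod
        ((PySem.List.max? (((c :: p2) ++ [c]).map (fun v => pvVal vertices v)) (fun x => x)).getD 0) 2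
        = parity := by
      unfold pvCheck at hchk
      rw [hidx] at hchk
      simp only [Option.getD_some] at hchk
      rw [hslice] at hchk
      simpa [pvVal, beq_iff_eq] using hchk
    -- the closed cycle as a chain
    have hKchain : List.IsChain (pvE edges) (c :: (p2 ++ [c])) := by
      have h' : List.IsChain (pvE edges) (p1 ++ c :: (p2 ++ [c])) := by
        simpa [List.append_assoc] using hch
      exact (List.isChain_split.mp h').2
    -- head decomposition of the whole walk
    obtain ⟨t0, hpc⟩ : ∃ t0, (p1 ++ c :: p2) ++ [c] = "v0" :: t0 := by
      cases hq : (p1 ++ c :: p2) ++ [c] with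
      | nil => simp at hq
      | cons a t0 =>
        rw [hq] at hhd
        simp at hhd
        rw [hhd] at hq ⊢
        exact ⟨t0, rfl⟩
    have hreachall : ∀ x ∈ (p1 ++ c :: p2) ++ [c], pvReach edges "v0" x := by
      intro x hx
      have hch' : List.IsChain (pvE edges) ("v0" :: t0) := by rwa [hpc] at hch
      have hx' : x ∈ "v0" :: t0 := by rwa [hpc] at hx
      exact pv_chain_rtg_head hch' hx'
    -- all cycle vertices are keyed
    have hkey : ∀ x ∈ (c :: p2) ++ [c], pvKeyed vertices x := by
      intro x hx
      have hxK : x ∈ c :: p2 := by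
        rcases List.mem_append.mp hx with h | h
        · exact h
        · simp at h; simp [h]
      have hxfull : x ∈ (p1 ++ c :: p2) ++ [c] := by
        rcases List.mem_cons.mp hxK with rfl | h
        · simp
        · simp [h]
      refine hpre x (hreachall x hxfull) ?_
      obtain ⟨w, hw1, hw2⟩ := pv_closed_chain_succ hKchain hxK
      exact ⟨w, hw1, hw2.mono (fun _ _ h => h)⟩
    -- the maximum of the cycle
    cases hmx : PySem.List.max? (((c :: p2) ++ [c]).map (fun v => pvVal vertices v)) (fun x => x) with
    | none =>
      rw [PySem.List.max?_eq_none_iff] at hmx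
      simp at hmx
    | some m =>
      obtain ⟨vm, hvmK, hfv⟩ := List.mem_map.mp (PySem.List.max?_mem hmx)
      have hub : ∀ x ∈ (c :: p2) ++ [c], pvVal vertices x ≤ m := fun x hx =>
        PySem.List.max?_isMax hmx _ (List.mem_map.mpr ⟨x, hx, rfl⟩)
      have hvmK' : vm ∈ c :: p2 := by
        rcases List.mem_append.mp hvmK with h | h
        · exact h
        · simp at h; simp [h]
      have hvmfull : vm ∈ (p1 ++ c :: p2) ++ [c] := by
        rcases List.mem_cons.mp hvmK' with rfl | h
        · simp
        · simp [h]
      have hmod : PySem.Int.mod (pvVal vertices vm) 2 = parity := by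
        rw [hfv]
        rw [hmx] at hchk'
        simpa using hchk'
      have hsubchain : List.IsChain (pvESub vertices edges (pvVal vertices vm)) (c :: (p2 ++ [c])) := by
        apply hKchain.imp_of_mem_imp
        intro x y hx hy hr
        refine ⟨hr, hkey y (by simpa [List.append_assoc] using hy), ?_⟩
        rw [hfv]
        exact hub y (by simpa [List.append_assoc] using hy)
      obtain ⟨w, hw1, hw2⟩ := pv_closed_chain_succ hsubchain hvmK'
      exact ⟨vm, hkey vm hvmK, hmod, hreachall vm hvmfull, w, hw1.1, hw1.2, hw2⟩
  | @step c nb p hnin hnb hf ih =>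
    intro hnd hch hhd
    apply ih
    · rw [List.nodup_append]
      refine ⟨hnd, by simp, ?_⟩
      intro a ha b hb
      rw [List.mem_singleton] at hb
      subst hb
      exact fun hac => hnin (hac ▸ ha)
    · apply hch.append (by simp : List.IsChain (pvE edges) [nb])
      intro x hx y hy
      simp only [List.head?_cons, Option.mem_def, Option.some.injEq] at hy
      subst hy
      rw [List.getLast?_concat] at hx
      simp only [Option.mem_def, Option.some.injEq] at hx
      subst hx
      exact hnb
    · rw [List.head?_append_of_ne_nil]
      · exact hhd
      · simp

-- ---- completeness: a good vertex makes A's DFS find a lasso ----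

theorem pv_follow (vertices : List (String × Int)) (edges : List (String × List String))
    (parity : Int) :
    ∀ (L : List String), ∀ (p : List String), ∀ (hL : L ≠ []), List.IsChain (pvE edges) L →
      (p ++ L.dropLast).Nodup → L.getLast hL ∈ p ++ L.dropLast →
      pvCheck vertices parity (L.getLast hL) (p ++ L.dropLast) = true →
      pvFound vertices edges parity (L.head hL) p := by
  intro L
  induction L with
  | nil => intro p hL; exact absurd rfl hL
  | cons c t ih =>
    intro p _ hch hnd hmem hchk
    cases t with
    | nil =>
      simp at hmem
      exact pvFound.cyc hmem (by simpa using hchk)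
    | cons c' t' =>
      have hdrop : (c :: c' :: t').dropLast = c :: (c' :: t').dropLast := rfl
      have hlast : (c :: c' :: t').getLast (by simp) = (c' :: t').getLast (by simp) :=
        List.getLast_cons _
      have hcp : c ∉ p := by
        rw [hdrop] at hnd
        intro hc
        exact (List.disjoint_of_nodup_append hnd) hc (by simp)
      have hassoc : (p ++ [c]) ++ (c' :: t').dropLast = p ++ (c :: c' :: t').dropLast := by
        rw [hdrop]; simp
      have hstep := ih (p ++ [c]) (by simp) hch.tail
        (by rw [hassoc]; rwa [hdrop] at hnd)
        (by rw [hassoc, ← hlast]; rwa [hdrop] at hmem)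
        (by rw [hassoc, ← hlast]; rwa [hdrop] at hchk)
      exact pvFound.step hcp hch.rel_head hstep

theorem pv_sub_all_of_chain {vertices : List (String × Int)} {edges : List (String × List String)}
    {m : Int} {w : String} {l : List String}
    (hch : List.IsChain (pvESub vertices edges m) (w :: l)) (hw : pvSubP vertices m w) :
    ∀ x ∈ w :: l, pvSubP vertices m x := by
  intro x hx
  rcases List.mem_cons.mp hx with rfl | hx'
  · exact hw
  · exact hch.cons_induction _ _ (fun _ _ hr hp => hr.2) hw x hx'

theorem pv_found_complete {vertices : List (String × Int)} {edges : List (String × List String)}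
    {parity : Int} {v : String} (hg : pvGood vertices edges parity v) :
    pvFound vertices edges parity "v0" [] := by
  obtain ⟨hkv, hmod, hreach, w, hEvw, hSw, hrtg⟩ := hg
  -- a closed walk at v inside the subgraph
  obtain ⟨l1, hch1, hlast1⟩ := List.exists_isChain_cons_of_relationReflTransGen hrtg
  have hsplit1 : w :: l1 = (w :: l1).dropLast ++ [v] := by
    conv_lhs => rw [← List.dropLast_append_getLast (l := w :: l1) (by simp)]
    rw [hlast1]
  have hcycfull : List.IsChain (pvESub vertices edges (pvVal vertices v))
      (v :: ((w :: l1).dropLast ++ [v])) := by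
    rw [← hsplit1]
    exact List.isChain_cons_cons.mpr ⟨⟨hEvw, hSw⟩, hch1⟩
  have hsuball : ∀ x ∈ w :: l1, pvSubP vertices (pvVal vertices v) x :=
    pv_sub_all_of_chain hch1 hSw
  obtain ⟨mid, hchK, hndK, hmidsub⟩ := pv_cyc_nodup v ((w :: l1).dropLast) hcycfull
  have hsubK : ∀ x ∈ v :: mid, pvSubP vertices (pvVal vertices v) x := by
    intro x hx
    rcases List.mem_cons.mp hx with rfl | hx'
    · exact ⟨hkv, le_refl _⟩
    · exact hsuball x ((List.dropLast_sublist _).subset (hmidsub x hx'))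
  -- a duplicate-free path from v0 to v
  obtain ⟨l0, hch0, hlast0⟩ := List.exists_isChain_cons_of_relationReflTransGen hreach
  obtain ⟨P, hchP, hheadP, hlastP, hndP, _⟩ := pv_path_nodup ("v0" :: l0) hch0
  have hPne : P ≠ [] := by intro h; rw [h] at hheadP; simp at hheadP
  have hvP : v ∈ P := by
    have hPl : P.getLast? = some v := by
      rw [hlastP, List.getLast?_eq_some_getLast (List.cons_ne_nil _ _), hlast0]
    rw [← pv_getLast_eq_of_getLast? hPne hPl]
    exact List.getLast_mem hPne
  -- first intersection of the path with the cycle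
  obtain ⟨P1, e, P2, hPdec, heK, hP1K⟩ := pv_first_split P (fun x => x ∈ v :: mid)
    ⟨v, hvP, by simp⟩
  -- rotate the cycle to start at e
  obtain ⟨k', hchK', hndK', hmemK'⟩ := pv_rotate hchK hndK heK
  have heP1 : e ∉ P1 := fun hc => hP1K e hc heK
  -- the combined DFS walk
  have hndX : (P1 ++ e :: k').Nodup := by
    rw [List.nodup_append]
    refine ⟨?_, hndK', ?_⟩
    · rw [hPdec] at hndP
      exact (List.nodup_append.mp hndP).1
    · intro a ha b hb hab
      exact hP1K a ha ((hmemK' a).mp (hab ▸ hb))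
  have hchX : List.IsChain (pvE edges) (P1 ++ e :: (k' ++ [e])) := by
    apply List.isChain_split.mpr
    constructor
    · rw [hPdec] at hchP
      exact (List.isChain_split.mp hchP).1
    · exact hchK'.imp (fun _ _ h => h.1)
  -- compute pvCheck at the final configuration
  have hidx : PySem.List.index? (P1 ++ e :: k') e = some P1.length :=
    (PySem.List.index?_eq_some_iff _ _ _).mpr
      ⟨P1, k', rfl, rfl, heP1⟩
  have hvK' : v ∈ e :: k' := (hmemK' v).mpr (by simp)
  have hchkX : pvCheck vertices parity e (P1 ++ e :: k') = true := by
    unfold pvCheck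
    rw [hidx]
    simp only [Option.getD_some]
    rw [PySem.List.slice_from_natCast, List.drop_left]
    have hmax : PySem.List.max? (((e :: k') ++ [e]).map (fun x => (pvPrio vertices x).getD 0))
        (fun x => x) = some (pvVal vertices v) := by
      apply pv_max?_eq
      · exact List.mem_map.mpr ⟨v, List.mem_append.mpr (Or.inl hvK'), rfl⟩
      · intro y hy
        obtain ⟨x, hx, rfl⟩ := List.mem_map.mp hy
        have hxK : x ∈ v :: mid := by
          rcases List.mem_append.mp hx with h | h
          · exact (hmemK' x).mp h
          · simp at h; subst h; exact (hmemK' x).mp (by simp)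
        exact (hsubK x hxK).2
    rw [hmax]
    simp only [Option.getD_some, beq_iff_eq]
    exact hmod
  -- head of the walk is "v0"
  have hLne : (P1 ++ e :: (k' ++ [e])) ≠ [] := by simp
  have hdropL : (P1 ++ e :: (k' ++ [e])).dropLast = P1 ++ e :: k' := by
    have : P1 ++ e :: (k' ++ [e]) = (P1 ++ e :: k') ++ [e] := by simp
    rw [this, List.dropLast_concat]
  have hlastL : (P1 ++ e :: (k' ++ [e])).getLast hLne = e := by
    have : P1 ++ e :: (k' ++ [e]) = (P1 ++ e :: k') ++ [e] := by simp
    simp only [this]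
    exact List.getLast_concat
  have hfound := pv_follow vertices edges parity (P1 ++ e :: (k' ++ [e])) [] hLne hchX
    (by rw [hdropL]; simpa using hndX)
    (by rw [hdropL, hlastL]; simp)
    (by rw [hdropL, hlastL]; simpa using hchkX)
  have hheadL : (P1 ++ e :: (k' ++ [e])).head hLne = "v0" := by
    apply pv_head_eq_of_head?
    have hPhead : P.head? = some "v0" := by rw [hheadP]; rfl
    have h1 : (P1 ++ e :: (k' ++ [e])).head? = P.head? := by
      rw [hPdec]
      rw [List.head?_append, List.head?_append]
      simp
    rw [h1, hPhead]
  rwa [hheadL] at hfound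

-- ---- B's program computes exactly "∃ v, pvGood v" ----

theorem pv_mem_foldl_names (l : List (String × List String)) :
    ∀ (s : PySem.Set String) (x : String),
      (x ∈ l.foldl (fun nm kv => PySem.Set.update (PySem.Set.add nm kv.1) kv.2) s ↔
        x ∈ s ∨ ∃ kv ∈ l, x = kv.1 ∨ x ∈ kv.2) := by
  induction l with
  | nil => intro s x; simp
  | cons kv l ih =>
    intro s x
    rw [List.foldl_cons, ih]
    rw [PySem.Set.mem_update, PySem.Set.mem_add]
    simp only [List.mem_cons]
    constructor
    · rintro (((h | h) | h) | ⟨kv', h1, h2⟩)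
      · exact Or.inl h
      · exact Or.inr ⟨kv, Or.inl rfl, Or.inl h⟩
      · exact Or.inr ⟨kv, Or.inl rfl, Or.inr h⟩
      · exact Or.inr ⟨kv', Or.inr h1, h2⟩
    · rintro (h | ⟨kv', (rfl | h1), h2⟩)
      · exact Or.inl (Or.inl (Or.inl h))
      · rcases h2 with h2 | h2
        · exact Or.inl (Or.inl (Or.inr h2))
        · exact Or.inl (Or.inr h2)
      · exact Or.inr ⟨kv', h1, h2⟩

theorem pv_nodup_foldl_names (l : List (String × List String)) :
    ∀ (s : PySem.Set String), s.Nodup →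
      (l.foldl (fun nm kv => PySem.Set.update (PySem.Set.add nm kv.1) kv.2) s).Nodup := by
  induction l with
  | nil => intro s hs; exact hs
  | cons kv l ih =>
    intro s hs
    rw [List.foldl_cons]
    exact ih _ (PySem.Set.nodup_update _ _ (PySem.Set.nodup_add _ _ hs))

theorem pv_alt_iff (vertices : List (String × Int)) (edges : List (String × List String))
    (parity : Int) :
    (find_lasso_highest_priority_alt vertices edges parity = true) ↔
      ∃ v, pvGood vertices edges parity v := by
  simp only [find_lasso_highest_priority_alt]
  set names : PySem.Set String :=
    (PySem.Dict.ofList edges).items.foldl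
      (fun nm kv => PySem.Set.update (PySem.Set.add nm kv.1) kv.2)
      (PySem.Set.union (PySem.Set.ofList ["v0"]) (PySem.Dict.ofList vertices).keys)
    with hnamesdef
  have hnames_nodup : names.Nodup :=
    pv_nodup_foldl_names _ _ (PySem.Set.nodup_union _ _ (PySem.Set.nodup_ofList _))
  have hv0 : "v0" ∈ names := by
    rw [hnamesdef, pv_mem_foldl_names]
    exact Or.inl ((PySem.Set.mem_union _ _ _).mpr (Or.inl ((PySem.Set.mem_ofList _ _).mpr (by simp))))
  have hnbrs_names : ∀ u w, pvE edges u w → w ∈ names := by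
    intro u w hw
    unfold pvE pvNbrs at hw
    cases hg : (PySem.Dict.ofList edges).get? u with
    | none => rw [hg] at hw; simp at hw
    | some vs =>
      rw [hg] at hw
      simp only [Option.getD_some] at hw
      rw [hnamesdef, pv_mem_foldl_names]
      exact Or.inr ⟨(u, vs), PySem.Dict.mem_items_of_get?_eq_some _ hg, Or.inr hw⟩
  have hreach_iff : ∀ x, x ∈ pvClosure edges names "v0" names.length ↔ pvReach edges "v0" x := by
    intro x
    rw [pv_closure_iff edges names "v0" names.length names hnames_nodup (fun y hy => hy) hv0
      le_rfl]
    constructor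
    · exact Relation.ReflTransGen.mono (fun u w hw => hw.1)
    · exact Relation.ReflTransGen.mono (fun u w hw => ⟨hw, hnbrs_names u w hw⟩)
  have hsubL_mem : ∀ (p : Int) (u : String),
      u ∈ PySem.Set.ofList (names.filter (fun u =>
        (PySem.Dict.ofList vertices).contains u &&
          decide (((PySem.Dict.ofList vertices).get? u).getD 0 ≤ p))) ↔
      u ∈ names ∧ pvKeyed vertices u ∧ pvVal vertices u ≤ p := by
    intro p u
    rw [PySem.Set.mem_ofList, List.mem_filter, Bool.and_eq_true, decide_eq_true_iff,
      PySem.Dict.contains_eq_isSome_get?]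
    unfold pvKeyed pvVal pvPrio
    tauto
  rw [List.any_eq_true]
  constructor
  · rintro ⟨v, hvreach, hbody⟩
    cases hg : (PySem.Dict.ofList vertices).get? v with
    | none => rw [hg] at hbody; simp at hbody
    | some p =>
      rw [hg] at hbody
      simp only at hbody
      by_cases hpar : (PySem.Int.mod p 2 == parity) = true
      · rw [if_pos hpar] at hbody
        rw [List.any_eq_true] at hbody
        obtain ⟨w, hwmem, hcond⟩ := hbody
        rw [Bool.and_eq_true, PySem.Set.contains_iff, PySem.Set.contains_iff] at hcond
        obtain ⟨hw1, hw2⟩ := hcond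
        have hwsub := (hsubL_mem p w).mp hw1
        have hkeyv : pvKeyed vertices v := by unfold pvKeyed pvPrio; rw [hg]; rfl
        have hvalv : pvVal vertices v = p := by unfold pvVal pvPrio; rw [hg]; rfl
        have hclo := pv_closure_iff edges _ w names.length names hnames_nodup
          (fun y hy => ((hsubL_mem p y).mp hy).1) hwsub.1 le_rfl v
        have hrtg : Relation.ReflTransGen (pvESub vertices edges p) w v := by
          refine Relation.ReflTransGen.mono ?_ (hclo.mp hw2)
          rintro a b ⟨h1, h2⟩
          exact ⟨h1, ((hsubL_mem p b).mp h2).2⟩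
        refine ⟨v, hkeyv, ?_, (hreach_iff v).mp hvreach, w, hwmem, ?_, ?_⟩
        · rw [hvalv]; exact beq_iff_eq.mp hpar
        · rw [hvalv]; exact hwsub.2
        · rw [hvalv]; exact hrtg
      · rw [if_neg hpar] at hbody
        simp at hbody
  · rintro ⟨v, hk, hmod, hreach, w, hE, hS, hR⟩
    refine ⟨v, (hreach_iff v).mpr hreach, ?_⟩
    have hg : (PySem.Dict.ofList vertices).get? v = some (pvVal vertices v) := by
      unfold pvKeyed pvPrio at hk
      cases hgv : (PySem.Dict.ofList vertices).get? v with
      | none => rw [hgv] at hk; simp at hk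
      | some p => unfold pvVal pvPrio; rw [hgv]; rfl
    rw [hg]
    simp only
    rw [if_pos (beq_iff_eq.mpr hmod)]
    rw [List.any_eq_true]
    refine ⟨w, hE, ?_⟩
    rw [Bool.and_eq_true, PySem.Set.contains_iff, PySem.Set.contains_iff]
    have hwsubL : w ∈ PySem.Set.ofList (names.filter (fun u =>
        (PySem.Dict.ofList vertices).contains u &&
          decide (((PySem.Dict.ofList vertices).get? u).getD 0 ≤ pvVal vertices v))) :=
      (hsubL_mem _ w).mpr ⟨hnbrs_names v w hE, hS.1, hS.2⟩
    refine ⟨hwsubL, ?_⟩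
    have hclo := pv_closure_iff edges _ w names.length names hnames_nodup
      (fun y hy => ((hsubL_mem (pvVal vertices v) y).mp hy).1)
      ((hsubL_mem _ w).mp hwsubL).1 le_rfl v
    refine hclo.mpr (Relation.ReflTransGen.mono ?_ hR)
    rintro a b ⟨h1, h2⟩
    exact ⟨h1, (hsubL_mem _ b).mpr ⟨hnbrs_names a b h1, h2⟩⟩

-- ---- Pre_ is the mathematical precondition ----

-- ---- Pre_ is the mathematical precondition ----

theorem pv_pre_iff (vertices : List (String × Int)) (edges : List (String × List String))
    (parity : Int) :
    Pre_find_lasso_highest_priority vertices edges parity ↔ pvPreM vertices edges := by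
  unfold Pre_find_lasso_highest_priority pvPreM
  constructor
  · intro h v hreach honcyc
    obtain ⟨w, hEw, hRw⟩ := honcyc
    apply h v ((pv_preReach_iff edges "v0" (by simp [pvFuelU]) v).mpr hreach)
    rw [List.any_eq_true]
    refine ⟨w, hEw, ?_⟩
    rw [List.contains_iff_mem]
    exact (pv_preReach_iff edges w (pv_nbrs_mem_U hEw) v).mpr hRw
  · intro h v hv hany
    apply h v ((pv_preReach_iff edges "v0" (by simp [pvFuelU]) v).mp hv)
    rw [List.any_eq_true] at hany
    obtain ⟨w, hw, hcont⟩ := hany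
    rw [List.contains_iff_mem] at hcont
    exact ⟨w, hw, (pv_preReach_iff edges w (pv_nbrs_mem_U hw) v).mp hcont⟩

-- ===== VERDICT (by name: the statement is the Claim_ definition above) =====
theorem find_lasso_highest_priority_spec : Claim_equal_find_lasso_highest_priority := by
  unfold Claim_equal_find_lasso_highest_priority
  intro vertices edges parity _hdom hpre
  unfold Spec_find_lasso_highest_priority
  have hpreM := (pv_pre_iff vertices edges parity).mp hpre
  rw [Bool.eq_iff_iff]
  constructor
  · intro hA
    have hF := (pv_A_iff_found vertices edges parity).mp hA
    have hv := pv_found_sound hpreM hF List.nodup_nil (by simp) (by simp)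
    exact (pv_alt_iff vertices edges parity).mpr hv
  · intro hB
    obtain ⟨v, hg⟩ := (pv_alt_iff vertices edges parity).mp hB
    exact (pv_A_iff_found vertices edges parity).mpr (pv_found_complete hg)
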